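-- pv_equiv track=rewrite | github.com/philipsantiagoo/IP | lista_05/d.py | verificando_tentativa_para_catalan
-- ===== SOURCE A (Python) =====
-- def verificando_catalan(a, b, c, catalan_seq, i = 0):
--     if i > len(catalan_seq) - 3:
--         return False
--     if catalan_seq[i] == a and catalan_seq[i + 1] == b and catalan_seq[i + 2] == c:
--         return True
--     return verificando_catalan(a, b, c, catalan_seq, i + 1)
--
-- def verificando_tentativa_para_catalan(entrada, valores_Runa, i = 0):
--     # Percorre todos os trios consecutivos da entrada
--     if i > 7:
--         return False
--
--     a = entrada[i]
--     b = entrada[i + 1]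
--     c = entrada[i + 2]
--
--     if verificando_catalan(a, b, c, valores_Runa):
--         return True
--
--     return verificando_tentativa_para_catalan(entrada, valores_Runa, i + 1)
--
-- valores_Runa = []
-- ===== SOURCE B (Python) =====
-- def verificando_tentativa_para_catalan(entrada, valores_Runa, i=0):
--     # Index all consecutive triples of valores_Runa once in a set, then scan
--     # entrada with a membership test instead of A's recursive rescans.
--     triples = set()
--     for j in range(len(valores_Runa) - 2):
--         triples.add((valores_Runa[j], valores_Runa[j + 1], valores_Runa[j + 2]))
--     for j in range(i, 8):
--         if (entrada[j], entrada[j + 1], entrada[j + 2]) in triples: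
--             return True
--     return False
-- ===== Notes on version B (the rewrite author's own statement) =====
-- stated objective: alternative
-- what changed: Replaces the double recursion (an outer scan that re-runs a recursive linear search of valores_Runa for every triple of entrada) with a set of all consecutive triples of valores_Runa built once, then a single loop over entrada with a set-membership test; it trades A's early-exit inner search for one full indexing pass.
import Mathlib
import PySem

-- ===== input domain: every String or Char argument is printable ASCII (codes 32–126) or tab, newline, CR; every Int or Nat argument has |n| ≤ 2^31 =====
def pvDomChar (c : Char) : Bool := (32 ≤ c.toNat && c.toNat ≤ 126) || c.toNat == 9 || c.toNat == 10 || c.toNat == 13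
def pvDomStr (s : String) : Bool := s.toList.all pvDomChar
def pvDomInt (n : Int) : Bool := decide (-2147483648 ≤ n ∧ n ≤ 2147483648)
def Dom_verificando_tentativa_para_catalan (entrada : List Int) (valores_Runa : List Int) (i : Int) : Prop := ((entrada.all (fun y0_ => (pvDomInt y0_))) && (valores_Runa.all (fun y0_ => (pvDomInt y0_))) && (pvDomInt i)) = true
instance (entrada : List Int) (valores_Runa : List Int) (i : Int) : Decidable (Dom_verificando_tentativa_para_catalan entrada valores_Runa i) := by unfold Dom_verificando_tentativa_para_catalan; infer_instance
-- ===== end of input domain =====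

-- B replaces A's per-triple recursive rescan of valores_Runa by a set of its consecutive
-- triples built once, looked up in one loop over entrada (objective: alternative algorithm).

-- ===== PORT A =====
-- helper: literal port of verificando_catalan (recursive linear search for the triple);
-- all its index accesses are guarded in range, so pyGetD's default is never used.
def pvCatalan (a b c : Int) (seq : List Int) (i : Int) : Bool :=
  if (seq.length : Int) - 3 < i then false
  else if PySem.List.pyGetD seq i 0 == a && PySem.List.pyGetD seq (i+1) 0 == b
          && PySem.List.pyGetD seq (i+2) 0 == c then true
  else pvCatalan a b c seq (i+1)
termination_by ((seq.length : Int) - 2 - i).toNat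
decreasing_by omega

def verificando_tentativa_para_catalan (entrada : List Int) (valores_Runa : List Int) (i : Int) : Bool :=
  if 7 < i then false
  else
    let a := PySem.List.pyGetD entrada i 0
    let b := PySem.List.pyGetD entrada (i+1) 0
    let c := PySem.List.pyGetD entrada (i+2) 0
    if pvCatalan a b c valores_Runa 0 then true
    else verificando_tentativa_para_catalan entrada valores_Runa (i+1)
termination_by (8 - i).toNat
decreasing_by omega

-- ===== PORT B =====
def pvTriple (xs : List Int) (j : Int) : Int × Int × Int :=
  (PySem.List.pyGetD xs j 0, PySem.List.pyGetD xs (j+1) 0, PySem.List.pyGetD xs (j+2) 0)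

def verificando_tentativa_para_catalan_alt (entrada : List Int) (valores_Runa : List Int) (i : Int) : Bool :=
  let triples : PySem.Set (Int × Int × Int) :=
    (PySem.List.pyRange 0 ((valores_Runa.length : Int) - 2) 1).foldl
      (fun s j => PySem.Set.add s (pvTriple valores_Runa j)) PySem.Set.empty
  (PySem.List.pyRange i 8 1).any (fun j => PySem.Set.contains triples (pvTriple entrada j))

-- ===== PRECONDITION & SPEC =====
-- Pre_ excludes exactly the inputs on which the scan raises IndexError (the recursion
-- reaches an out-of-range index of entrada before any match or before i exceeds 7);
-- Python A and Python B both raise on exactly those inputs, so nothing A returns on is excluded.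
def Pre_verificando_tentativa_para_catalan (entrada : List Int) (valores_Runa : List Int) (i : Int) : Prop :=
  7 < i ∨ (-(entrada.length : Int) ≤ i ∧
    ((∀ j ∈ PySem.List.pyRange i 8 1,
        -(entrada.length : Int) ≤ j ∧ (j + 2 < 0 ∨ j + 2 < (entrada.length : Int))) ∨
     (∃ j ∈ PySem.List.pyRange i 8 1,
        (∃ k ∈ List.range valores_Runa.length, k + 3 ≤ valores_Runa.length ∧
          PySem.List.pyGetD valores_Runa (k : Int) 0 = PySem.List.pyGetD entrada j 0 ∧
          PySem.List.pyGetD valores_Runa ((k : Int) + 1) 0 = PySem.List.pyGetD entrada (j + 1) 0 ∧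
          PySem.List.pyGetD valores_Runa ((k : Int) + 2) 0 = PySem.List.pyGetD entrada (j + 2) 0) ∧
        ∀ k ∈ PySem.List.pyRange i 8 1, k ≤ j →
          -(entrada.length : Int) ≤ k ∧ (k + 2 < 0 ∨ k + 2 < (entrada.length : Int)))))
instance (entrada : List Int) (valores_Runa : List Int) (i : Int) : Decidable (Pre_verificando_tentativa_para_catalan entrada valores_Runa i) := by unfold Pre_verificando_tentativa_para_catalan; infer_instance

def pvWitness_verificando_tentativa_para_catalan : List Int × List Int × Int :=
  ([0, 1, 2, 3, 4, 5, 6, 7, 8, 9], [3, 4, 5], 0)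

def Spec_verificando_tentativa_para_catalan (entrada : List Int) (valores_Runa : List Int) (i : Int) (out : Bool) : Prop := out = verificando_tentativa_para_catalan_alt entrada valores_Runa i
instance (entrada : List Int) (valores_Runa : List Int) (i : Int) (out : Bool) : Decidable (Spec_verificando_tentativa_para_catalan entrada valores_Runa i out) := by unfold Spec_verificando_tentativa_para_catalan; infer_instance

-- ===== CLAIM (what is proved, stated in full; the proofs are below) =====
def Claim_equal_verificando_tentativa_para_catalan : Prop := ∀ (entrada : List Int) (valores_Runa : List Int) (i : Int), Dom_verificando_tentativa_para_catalan entrada valores_Runa i → Pre_verificando_tentativa_para_catalan entrada valores_Runa i → Spec_verificando_tentativa_para_catalan entrada valores_Runa i (verificando_tentativa_para_catalan entrada valores_Runa i)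

-- ===== LEMMAS AND PROOFS =====

-- A's inner search succeeds iff some in-range consecutive triple of seq equals (a,b,c).
theorem pvCatalan_iff (a b c : Int) (seq : List Int) (i : Int) :
    pvCatalan a b c seq i = true ↔
      ∃ j : Int, i ≤ j ∧ j < (seq.length : Int) - 2 ∧ pvTriple seq j = (a, b, c) := by
  rw [pvCatalan]
  split
  · constructor
    · intro h; exact absurd h (by simp)
    · rintro ⟨j, h1, h2, _⟩; omega
  · rename_i hle
    split
    · rename_i heq
      constructor
      · intro _
        refine ⟨i, le_refl i, by omega, ?_⟩
        simp only [Bool.and_eq_true, beq_iff_eq] at heq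
        simp [pvTriple, heq.1.1, heq.1.2, heq.2]
      · intro _; rfl
    · rename_i hne
      rw [pvCatalan_iff a b c seq (i+1)]
      constructor
      · rintro ⟨j, h1, h2, h3⟩; exact ⟨j, by omega, h2, h3⟩
      · rintro ⟨j, h1, h2, h3⟩
        refine ⟨j, ?_, h2, h3⟩
        rcases lt_or_ge i j with h | h
        · omega
        · exfalso
          have hij : j = i := le_antisymm (by omega) h1
          subst hij
          simp only [pvTriple, Prod.mk.injEq] at h3
          simp [h3.1, h3.2.1, h3.2.2] at hne
termination_by ((seq.length : Int) - 2 - i).toNat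
decreasing_by omega

-- B's set contains exactly those triples.
theorem triples_mem (valores_Runa : List Int) (t : Int × Int × Int) :
    (t ∈ (PySem.List.pyRange 0 ((valores_Runa.length : Int) - 2) 1).foldl
        (fun s j => PySem.Set.add s (pvTriple valores_Runa j)) PySem.Set.empty) ↔
      ∃ j : Int, 0 ≤ j ∧ j < (valores_Runa.length : Int) - 2 ∧ pvTriple valores_Runa j = t := by
  rw [PySem.Set.mem_foldl_add]
  simp only [PySem.Set.empty, List.not_mem_nil, false_or, PySem.List.mem_pyRange_one]
  constructor
  · rintro ⟨j, ⟨h1, h2⟩, h3⟩; exact ⟨j, h1, h2, h3.symm⟩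
  · rintro ⟨j, h1, h2, h3⟩; exact ⟨j, ⟨h1, h2⟩, h3.symm⟩

-- The two ports agree on every input (no precondition needed for the ports themselves).
theorem ports_eq (entrada : List Int) (valores_Runa : List Int) (i : Int) :
    verificando_tentativa_para_catalan entrada valores_Runa i
      = verificando_tentativa_para_catalan_alt entrada valores_Runa i := by
  rw [verificando_tentativa_para_catalan, verificando_tentativa_para_catalan_alt]
  split
  · rename_i h
    rw [PySem.List.pyRange_one_eq_nil (by omega)]
    simp
  · rename_i h
    rw [PySem.List.pyRange_one_cons (by omega), List.any_cons]
    have hcat : pvCatalan (PySem.List.pyGetD entrada i 0) (PySem.List.pyGetD entrada (i+1) 0)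
        (PySem.List.pyGetD entrada (i+2) 0) valores_Runa 0
        = PySem.Set.contains
            ((PySem.List.pyRange 0 ((valores_Runa.length : Int) - 2) 1).foldl
              (fun s j => PySem.Set.add s (pvTriple valores_Runa j)) PySem.Set.empty)
            (pvTriple entrada i) := by
      rw [Bool.eq_iff_iff, pvCatalan_iff, PySem.Set.contains_iff, triples_mem]
      constructor
      · rintro ⟨j, h1, h2, h3⟩; exact ⟨j, h1, h2, h3.trans (by simp [pvTriple])⟩
      · rintro ⟨j, h1, h2, h3⟩; exact ⟨j, h1, h2, h3.trans (by simp [pvTriple])⟩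
    show (if pvCatalan (PySem.List.pyGetD entrada i 0) (PySem.List.pyGetD entrada (i+1) 0)
        (PySem.List.pyGetD entrada (i+2) 0) valores_Runa 0 = true then true
      else verificando_tentativa_para_catalan entrada valores_Runa (i+1)) = _
    rw [hcat, ports_eq entrada valores_Runa (i+1)]
    cases hC : PySem.Set.contains
        ((PySem.List.pyRange 0 ((valores_Runa.length : Int) - 2) 1).foldl
          (fun s j => PySem.Set.add s (pvTriple valores_Runa j)) PySem.Set.empty)
        (pvTriple entrada i)
    · simp only [hC, Bool.false_eq_true, if_false, Bool.false_or]
      rw [verificando_tentativa_para_catalan_alt]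
    · simp [hC]
termination_by (8 - i).toNat
decreasing_by omega

-- ===== VERDICT (by name: the statement is the Claim_ definition above) =====
theorem verificando_tentativa_para_catalan_spec : Claim_equal_verificando_tentativa_para_catalan := by
  intro entrada valores_Runa i _ _
  exact ports_eq entrada valores_Runa i
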